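-- pv_equiv track=rewrite | github.com/jpbulman/Project-Euler | src/PY/35.py | findCeilChar
-- ===== SOURCE A (Python) =====
-- def findCeilChar(indexOfFirstCharacter,n):
--     string = str(n)
--     firstChar = int(string[indexOfFirstCharacter])
--
--     listOfGreaterNums = {}
--     right = string[indexOfFirstCharacter:]
--
--     pos = indexOfFirstCharacter+1
--
--     for i in right:
--         if int(i) > firstChar:
--             listOfGreaterNums[i]=pos
--         pos+=1
--
--     return listOfGreaterNums[min(listOfGreaterNums)]
-- ===== SOURCE B (Python) =====
-- def findCeilChar(indexOfFirstCharacter, n):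
--     string = str(n)
--     firstChar = int(string[indexOfFirstCharacter])
--     best = None
--     bestPos = 0
--     pos = indexOfFirstCharacter + 1
--     for c in string[indexOfFirstCharacter:]:
--         d = int(c)
--         if d > firstChar and (best is None or d <= best):
--             best = d
--             bestPos = pos
--         pos += 1
--     if best is None:
--         raise ValueError("no digit greater than the first character")
--     return bestPos
-- ===== Notes on version B (the rewrite author's own statement) =====
-- stated objective: simpler
-- what changed: B replaces A's dict of greater digits plus a final min() over its keys by a single pass that keeps a running minimum greater digit and the position of its last occurrence.
import Mathlib
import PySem

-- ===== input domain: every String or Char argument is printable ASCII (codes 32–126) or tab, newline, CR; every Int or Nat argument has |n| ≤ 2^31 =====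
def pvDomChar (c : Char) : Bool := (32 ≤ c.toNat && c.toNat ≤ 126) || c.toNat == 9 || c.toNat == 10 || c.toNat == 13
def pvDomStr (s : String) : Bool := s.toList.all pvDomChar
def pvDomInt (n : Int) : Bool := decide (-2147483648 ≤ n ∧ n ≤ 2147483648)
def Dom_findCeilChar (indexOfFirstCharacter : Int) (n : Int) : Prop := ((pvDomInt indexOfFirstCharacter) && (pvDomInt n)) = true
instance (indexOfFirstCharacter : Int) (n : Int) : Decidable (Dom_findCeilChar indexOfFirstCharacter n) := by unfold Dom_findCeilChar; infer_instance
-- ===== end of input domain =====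

-- B replaces A's dict-of-greater-digits + min() with a single pass keeping a running minimum
-- (objective: simpler). Equivalence is about return values; where A raises, B raises too.

-- int(c) for a single character c (shared value helper; none = ValueError, defaulted outside Pre_)
def pyIntOfChar (c : Char) : Int := (PySem.Int.ofChars? [c]).getD 0

-- ===== PORT A =====
-- loop body of A: conditionally record this char's position in the dict, advance pos
def loopA (firstChar : Int) (st : PySem.Dict Char Int × Int) (i : Char) : PySem.Dict Char Int × Int :=
  ((if pyIntOfChar i > firstChar then st.1.insert i st.2 else st.1), st.2 + 1)

def findCeilChar (indexOfFirstCharacter : Int) (n : Int) : Int :=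
  let string := PySem.Int.toChars n
  let firstChar := pyIntOfChar ((PySem.List.pyGet? string indexOfFirstCharacter).getD ' ')
  let right := PySem.List.slice string (some indexOfFirstCharacter) none
  let st := right.foldl (loopA firstChar) (PySem.Dict.empty, indexOfFirstCharacter + 1)
  match PySem.List.min? st.1.keys (fun k => k) with
  | some k => (st.1.get? k).getD 0     -- listOfGreaterNums[min(listOfGreaterNums)]
  | none => 0                          -- Python: min({}) raises ValueError (outside Pre_)

-- ===== PORT B =====
-- loop body of B: running minimum (ties update the position), advance pos
def loopB (firstChar : Int) (st : Option Int × Int × Int) (c : Char) : Option Int × Int × Int :=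
  if pyIntOfChar c > firstChar && (match st.1 with | none => true | some b => decide (pyIntOfChar c ≤ b))
  then (some (pyIntOfChar c), st.2.2, st.2.2 + 1)
  else (st.1, st.2.1, st.2.2 + 1)

def findCeilChar_alt (indexOfFirstCharacter : Int) (n : Int) : Int :=
  let string := PySem.Int.toChars n
  let firstChar := pyIntOfChar ((PySem.List.pyGet? string indexOfFirstCharacter).getD ' ')
  let st := (PySem.List.slice string (some indexOfFirstCharacter) none).foldl
    (loopB firstChar) (none, 0, indexOfFirstCharacter + 1)
  match st.1 with
  | some _ => st.2.1
  | none => 0                          -- Python: raise ValueError (outside Pre_)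

-- ===== PRECONDITION & SPEC =====
-- Pre_ = exactly where A returns: the index is in range, the indexed character is a digit
-- (so int() parses it and everything to its right), and some digit to the right is greater
-- (else min({}) raises ValueError).
def Pre_findCeilChar (indexOfFirstCharacter : Int) (n : Int) : Prop :=
  ((PySem.List.pyGet? (PySem.Int.toChars n) indexOfFirstCharacter).elim false
    (fun c => c.isDigit &&
      (PySem.List.slice (PySem.Int.toChars n) (some indexOfFirstCharacter) none).any
        (fun c' => c < c'))) = true
instance (indexOfFirstCharacter : Int) (n : Int) : Decidable (Pre_findCeilChar indexOfFirstCharacter n) := by unfold Pre_findCeilChar; infer_instance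

def pvWitness_findCeilChar : Int × Int := (0, 13)

def Spec_findCeilChar (indexOfFirstCharacter : Int) (n : Int) (out : Int) : Prop := out = findCeilChar_alt indexOfFirstCharacter n
instance (indexOfFirstCharacter : Int) (n : Int) (out : Int) : Decidable (Spec_findCeilChar indexOfFirstCharacter n out) := by unfold Spec_findCeilChar; infer_instance

-- ===== CLAIM (what is proved, stated in full; the proofs are below) =====
def Claim_equal_findCeilChar : Prop := ∀ (indexOfFirstCharacter : Int) (n : Int), Dom_findCeilChar indexOfFirstCharacter n → Pre_findCeilChar indexOfFirstCharacter n → Spec_findCeilChar indexOfFirstCharacter n (findCeilChar indexOfFirstCharacter n)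

-- ===== LEMMAS AND PROOFS =====

-- digit values
theorem digit_cases (c : Char) (h : c.isDigit = true) :
    c = '0' ∨ c = '1' ∨ c = '2' ∨ c = '3' ∨ c = '4' ∨ c = '5' ∨ c = '6' ∨ c = '7' ∨ c = '8' ∨ c = '9' := by
  have h1 : 48 ≤ c.toNat ∧ c.toNat ≤ 57 := by
    simp [Char.isDigit] at h
    exact ⟨by exact_mod_cast h.1, by exact_mod_cast h.2⟩
  have hinj : ∀ d : Char, c.toNat = d.toNat → c = d := fun d hd => Char.ext (UInt32.toNat_inj.mp hd)
  have h2 : c.toNat = 48 ∨ c.toNat = 49 ∨ c.toNat = 50 ∨ c.toNat = 51 ∨ c.toNat = 52 ∨ c.toNat = 53 ∨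
      c.toNat = 54 ∨ c.toNat = 55 ∨ c.toNat = 56 ∨ c.toNat = 57 := by omega
  rcases h2 with h|h|h|h|h|h|h|h|h|h <;> first
    | exact .inl (hinj _ h)
    | exact .inr (.inl (hinj _ h))
    | exact .inr (.inr (.inl (hinj _ h)))
    | exact .inr (.inr (.inr (.inl (hinj _ h))))
    | exact .inr (.inr (.inr (.inr (.inl (hinj _ h)))))
    | exact .inr (.inr (.inr (.inr (.inr (.inl (hinj _ h))))))
    | exact .inr (.inr (.inr (.inr (.inr (.inr (.inl (hinj _ h)))))))
    | exact .inr (.inr (.inr (.inr (.inr (.inr (.inr (.inl (hinj _ h))))))))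
    | exact .inr (.inr (.inr (.inr (.inr (.inr (.inr (.inr (.inl (hinj _ h)))))))))
    | exact .inr (.inr (.inr (.inr (.inr (.inr (.inr (.inr (.inr (hinj _ h)))))))))

theorem pyIntOfChar_digit (c : Char) (h : c.isDigit = true) :
    pyIntOfChar c = (c.toNat : Int) - 48 := by
  rcases digit_cases c h with h|h|h|h|h|h|h|h|h|h <;> subst h <;> decide

theorem digit_le_iff (a b : Char) (ha : a.isDigit = true) (hb : b.isDigit = true) :
    (pyIntOfChar a ≤ pyIntOfChar b) ↔ a ≤ b := by
  rw [pyIntOfChar_digit a ha, pyIntOfChar_digit b hb, Char.le_def, UInt32.le_iff_toNat_le]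
  simp only [Char.toNat] at *
  omega

theorem digit_lt_iff (a b : Char) (ha : a.isDigit = true) (hb : b.isDigit = true) :
    (pyIntOfChar a < pyIntOfChar b) ↔ a < b := by
  rw [pyIntOfChar_digit a ha, pyIntOfChar_digit b hb, Char.lt_def, UInt32.lt_iff_toNat_lt]
  simp only [Char.toNat] at *
  omega

-- str(n) is a possible '-' followed by decimal digits
theorem digitChar_digit (k : Nat) (h : k < 10) : (Nat.digitChar k).isDigit = true := by
  interval_cases k <;> decide

theorem mem_toDigitsCore_digit (f : Nat) : ∀ (m : Nat) (acc : List Char) (c : Char),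
    c ∈ Nat.toDigitsCore 10 f m acc → c ∈ acc ∨ c.isDigit = true := by
  induction f with
  | zero => intro m acc c h; simp only [Nat.toDigitsCore] at h; exact .inl h
  | succ f ih =>
    intro m acc c h
    simp only [Nat.toDigitsCore] at h
    by_cases h0 : m / 10 = 0
    · rw [if_pos h0] at h
      rcases List.mem_cons.mp h with h | h
      · exact .inr (h ▸ digitChar_digit _ (Nat.mod_lt _ (by norm_num)))
      · exact .inl h
    · rw [if_neg h0] at h
      rcases ih _ _ _ h with h | h
      · rcases List.mem_cons.mp h with h | h
        · exact .inr (h ▸ digitChar_digit _ (Nat.mod_lt _ (by norm_num)))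
        · exact .inl h
      · exact .inr h

theorem mem_toDigits_digit (m : Nat) (c : Char) (h : c ∈ Nat.toDigits 10 m) :
    c.isDigit = true := by
  rcases mem_toDigitsCore_digit _ _ _ _ h with h | h
  · simp at h
  · exact h

theorem toChars_nonneg (n : Int) (hn : 0 ≤ n) :
    PySem.Int.toChars n = Nat.toDigits 10 n.toNat := by
  simp [PySem.Int.toChars, not_lt.mpr hn]

theorem toChars_neg (n : Int) (hn : n < 0) :
    PySem.Int.toChars n = '-' :: Nat.toDigits 10 n.natAbs := by
  simp [PySem.Int.toChars, hn]

-- the right part of the string decomposes as a drop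
theorem right_decomp (s : List Char) (idx : Int) (c₀ : Char)
    (h : PySem.List.pyGet? s idx = some c₀) :
    ∃ j : Nat, j < s.length ∧ s[j]? = some c₀ ∧
      PySem.List.slice s (some idx) none = s.drop j := by
  by_cases h0 : 0 ≤ idx
  · rw [PySem.List.pyGet?_of_nonneg s h0] at h
    exact ⟨idx.toNat, (List.getElem?_eq_some_iff.mp h).1, h, PySem.List.slice_from s h0⟩
  · have h0' : idx < 0 := lt_of_not_ge h0
    set k := (-idx).toNat with hk
    have hkpos : 0 < k := by omega
    have hidx : idx = -(k : Int) := by omega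
    have hkle : k ≤ s.length := by
      by_contra hgt
      rw [(PySem.List.pyGet?_eq_none_iff s idx).mpr] at h
      · simp at h
      · simp [PySem.Raise.InRange]; omega
    rw [hidx, PySem.List.pyGet?_neg_natCast s k hkpos hkle] at h
    exact ⟨s.length - k, by omega, h, by rw [hidx]; exact PySem.List.slice_from_neg_natCast s k hkpos⟩

-- min over keys after appending one element
theorem min?_append_singleton (ks : List Char) (m c : Char)
    (h : PySem.List.min? ks (fun k => k) = some m) :
    PySem.List.min? (ks ++ [c]) (fun k => k) = some (min m c) := by
  cases ks with
  | nil => simp [PySem.List.min?] at h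
  | cons k0 t =>
    rw [PySem.List.min?_id_cons] at h
    rw [List.cons_append, PySem.List.min?_id_cons, List.foldl_append]
    simp only [List.foldl_cons, List.foldl_nil]
    rw [Option.some_inj.mp h]

-- coupling invariant between A's dict and B's running minimum (proof helper)
def CoupInv (d : PySem.Dict Char Int) (best : Option Int) (bp : Int) : Prop :=
  match best with
  | none => d = PySem.Dict.empty
  | some b => d.keys.Nodup ∧ (∀ k ∈ d.keys, k.isDigit = true) ∧
      ∃ m, PySem.List.min? d.keys (fun k => k) = some m ∧
        pyIntOfChar m = b ∧ d.get? m = some bp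

theorem step_pres (Fi : Int) (c : Char) (hc : c.isDigit = true)
    (d : PySem.Dict Char Int) (best : Option Int) (bp p : Int)
    (hInv : CoupInv d best bp) :
    CoupInv (loopA Fi (d, p) c).1 (loopB Fi (best, bp, p) c).1 (loopB Fi (best, bp, p) c).2.1 := by
  by_cases hgt : pyIntOfChar c > Fi
  · cases best with
    | none =>
      have hd : d = PySem.Dict.empty := hInv
      subst hd
      simp only [loopA, loopB, hgt, if_pos, decide_true, Bool.true_and]
      refine ⟨?_, ?_, c, ?_, rfl, PySem.Dict.get?_insert_self _ _ _⟩
      · exact PySem.Dict.nodup_keys_insert _ _ _ PySem.Dict.nodup_keys_empty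
      · intro k hk
        rcases (PySem.Dict.mem_keys_insert _ _ _ _).mp hk with h | h
        · exact h ▸ hc
        · simp [PySem.Dict.keys_empty] at h
      · rw [PySem.Dict.keys_insert_of_not_contains _ _ (by simp [PySem.Dict.contains_empty]),
           PySem.Dict.keys_empty, List.nil_append, PySem.List.min?_id_cons]
        rfl
    | some b =>
      obtain ⟨hnd, hdig, m, hmin, hmb, hget⟩ := hInv
      have hm_mem : m ∈ d.keys := PySem.List.min?_mem hmin
      have hmdig : m.isDigit = true := hdig m hm_mem
      have hnd' : (d.insert c p).keys.Nodup := PySem.Dict.nodup_keys_insert _ _ _ hnd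
      have hdig' : ∀ k ∈ (d.insert c p).keys, k.isDigit = true := by
        intro k hk
        rcases (PySem.Dict.mem_keys_insert _ _ _ _).mp hk with h | h
        · exact h ▸ hc
        · exact hdig k h
      by_cases hle : pyIntOfChar c ≤ b
      · simp only [loopA, loopB, hgt, if_pos, decide_true, Bool.true_and, hle]
        refine ⟨hnd', hdig', ?_⟩
        have hcm : c ≤ m := (digit_le_iff c m hc hmdig).mp (hmb ▸ hle)
        by_cases hcm_eq : c = m
        · subst hcm_eq
          refine ⟨c, ?_, rfl, PySem.Dict.get?_insert_self _ _ _⟩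
          rw [PySem.Dict.keys_insert_of_contains _ _
            ((PySem.Dict.contains_iff_mem_keys _ _).mpr hm_mem)]
          exact hmin
        · have hlt : c < m := lt_of_le_of_ne hcm hcm_eq
          have hnotmem : c ∉ d.keys := fun hmem =>
            absurd (PySem.List.min?_isMin hmin c hmem) (not_le.mpr hlt)
          refine ⟨c, ?_, rfl, PySem.Dict.get?_insert_self _ _ _⟩
          rw [PySem.Dict.keys_insert_of_not_contains _ _
            (by rcases hcon : d.contains c with _ | _
                · rfl
                · exact absurd ((PySem.Dict.contains_iff_mem_keys _ _).mp hcon) hnotmem),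
            min?_append_singleton _ m c hmin, min_eq_right (le_of_lt hlt)]
      · simp only [loopA, loopB, hgt, if_pos, decide_true, Bool.true_and, hle, decide_false]
        refine ⟨hnd', hdig', m, ?_, hmb, ?_⟩
        · have hmc : m < c := (digit_lt_iff m c hmdig hc).mp (by omega)
          by_cases hmem : c ∈ d.keys
          · rw [PySem.Dict.keys_insert_of_contains _ _
              ((PySem.Dict.contains_iff_mem_keys _ _).mpr hmem)]
            exact hmin
          · rw [PySem.Dict.keys_insert_of_not_contains _ _
              (by rcases hcon : d.contains c with _ | _
                  · rfl
                  · exact absurd ((PySem.Dict.contains_iff_mem_keys _ _).mp hcon) hmem),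
              min?_append_singleton _ m c hmin, min_eq_left (le_of_lt hmc)]
        · have hmc : m < c := (digit_lt_iff m c hmdig hc).mp (by omega)
          rw [PySem.Dict.get?_insert_of_ne _ _ (ne_of_lt hmc)]
          exact hget
  · cases best with
    | none =>
      have hd : d = PySem.Dict.empty := hInv
      simp only [loopA, loopB, hgt, decide_false, Bool.false_and]
      exact hd
    | some b =>
      simp only [loopA, loopB, hgt, decide_false, Bool.false_and]
      exact hInv

theorem fold_agree (Fi : Int) (l : List Char) (hl : ∀ c ∈ l, c.isDigit = true) :
    ∀ (d : PySem.Dict Char Int) (best : Option Int) (bp p : Int), CoupInv d best bp →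
    CoupInv (l.foldl (loopA Fi) (d, p)).1
        (l.foldl (loopB Fi) (best, bp, p)).1 (l.foldl (loopB Fi) (best, bp, p)).2.1 := by
  induction l with
  | nil => intro d best bp p hInv; simpa using hInv
  | cons c l ih =>
    intro d best bp p hInv
    have hstep := step_pres Fi c (hl c List.mem_cons_self) d best bp p hInv
    have hA : loopA Fi (d, p) c = ((loopA Fi (d, p) c).1, p + 1) := rfl
    have hB2 : (loopB Fi (best, bp, p) c).2.2 = p + 1 := by
      unfold loopB; split <;> split <;> rfl
    have hB : loopB Fi (best, bp, p) c =
        ((loopB Fi (best, bp, p) c).1, (loopB Fi (best, bp, p) c).2.1, p + 1) := by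
      rw [← hB2]
    simp only [List.foldl_cons]
    have hmain := ih (fun x hx => hl x (List.mem_cons_of_mem _ hx))
      (loopA Fi (d, p) c).1 (loopB Fi (best, bp, p) c).1 (loopB Fi (best, bp, p) c).2.1 (p + 1) hstep
    rw [← hA, ← hB] at hmain
    exact hmain

-- ===== VERDICT (by name: the statement is the Claim_ definition above) =====
theorem findCeilChar_spec : Claim_equal_findCeilChar := by
  intro idx n _ hPre
  unfold Spec_findCeilChar
  unfold Pre_findCeilChar at hPre
  rcases hopt : PySem.List.pyGet? (PySem.Int.toChars n) idx with _ | c₀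
  · rw [hopt] at hPre; simp at hPre
  · rw [hopt] at hPre
    simp only [Option.elim, Bool.and_eq_true] at hPre
    obtain ⟨hc₀, -⟩ := hPre
    obtain ⟨j, hj, hgetj, hslice⟩ := right_decomp _ idx c₀ hopt
    have hdigs : ∀ x ∈ (PySem.Int.toChars n).drop j, x.isDigit = true := by
      intro x hx
      by_cases hn : 0 ≤ n
      · rw [toChars_nonneg n hn] at hx
        exact mem_toDigits_digit _ _ (List.drop_subset _ _ hx)
      · have hn' : n < 0 := lt_of_not_ge hn
        rw [toChars_neg n hn'] at hx
        have hj0 : j ≠ 0 := by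
          intro hj0
          rw [hj0, toChars_neg n hn'] at hgetj
          simp at hgetj
          rw [← hgetj] at hc₀
          simp at hc₀
        obtain ⟨j', rfl⟩ := Nat.exists_eq_succ_of_ne_zero hj0
        rw [List.drop_succ_cons] at hx
        exact mem_toDigits_digit _ _ (List.drop_subset _ _ hx)
    simp only [findCeilChar, findCeilChar_alt, hopt, Option.getD_some, hslice]
    have hinv := fold_agree (pyIntOfChar c₀) _ hdigs PySem.Dict.empty none 0 (idx + 1) rfl
    rcases hB : (List.foldl (loopB (pyIntOfChar c₀)) (none, 0, idx + 1)
        ((PySem.Int.toChars n).drop j)).1 with _ | b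
    · rw [hB] at hinv
      have hd : (List.foldl (loopA (pyIntOfChar c₀)) (PySem.Dict.empty, idx + 1)
          ((PySem.Int.toChars n).drop j)).1 = PySem.Dict.empty := hinv
      simp [hd, PySem.Dict.keys_empty, PySem.List.min?]
    · rw [hB] at hinv
      obtain ⟨-, -, m, hmin, -, hget⟩ := hinv
      simp [hmin, hget]
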